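-- pv_equiv track=rewrite | github.com/august-hw2/24_Programmers_Python_Basics | 프로그래머스/0/181890. 왼쪽 오른쪽/왼쪽 오른쪽.py | solution
-- ===== SOURCE A (Python) =====
-- def solution(str_list):
--
--     if 1<=len(str_list)<=20:
--
--         res = [] #결과값 리스트 선언
--
--         for i, j in enumerate(str_list):
--             if j == "l": #왼쪽인 경우
--                 res+=str_list[0:i]
--                 return res
--
--             elif j == "r": #오른쪽인 경우
--                 res+=str_list[i+1:]
--                 return res
--
--         return res #"l" 또는 "r"이 없는 경우
--
--     else:
--         return -1
-- ===== SOURCE B (Python) =====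
-- def _scan(xs):
--     # Recursively find the first marker: returns (tag, value) where tag is
--     # "l", "r" or None; the "before l" prefix is rebuilt by consing on the way out.
--     if not xs:
--         return (None, [])
--     head, tail = xs[0], xs[1:]
--     if head == "l":
--         return ("l", [])
--     if head == "r":
--         return ("r", tail)
--     tag, rest = _scan(tail)
--     if tag == "l":
--         return (tag, [head] + rest)
--     return (tag, rest)
--
-- def solution(str_list):
--     if not (1 <= len(str_list) <= 20):
--         return -1
--     return _scan(str_list)[1]
-- ===== Notes on version B (the rewrite author's own statement) =====
-- stated objective: alternative
-- what changed: B replaces A's indexed enumerate-loop with early returns and slice arithmetic by a recursion on the list structure that carries no indices at all: it returns a tag saying which marker was hit and rebuilds the before-'l' prefix by consing elements back on the way out of the recursion.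
-- outside the precondition, e.g. on solution([]): A returns -1, B returns -1
import Mathlib
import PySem

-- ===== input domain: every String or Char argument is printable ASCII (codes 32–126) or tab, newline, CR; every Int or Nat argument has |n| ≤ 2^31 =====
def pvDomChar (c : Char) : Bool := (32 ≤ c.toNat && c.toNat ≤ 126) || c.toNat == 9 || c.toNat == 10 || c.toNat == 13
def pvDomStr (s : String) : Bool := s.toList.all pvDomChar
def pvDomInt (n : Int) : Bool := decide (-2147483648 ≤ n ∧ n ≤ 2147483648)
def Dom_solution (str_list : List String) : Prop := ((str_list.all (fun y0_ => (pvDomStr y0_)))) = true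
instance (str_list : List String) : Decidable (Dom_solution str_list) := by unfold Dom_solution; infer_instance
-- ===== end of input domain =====

-- B replaces A's indexed enumerate-loop with slice arithmetic by an index-free structural
-- recursion that tags which marker was hit and rebuilds the before-"l" prefix by consing on
-- the way out; same O(n) cost ("alternative").
-- Pre_ excludes lists whose length is outside 1..20, where A returns -1 (an int, not a list of strings).


-- ===== PORT A =====
-- the for-loop over enumerate(str_list) with its early returns
def solutionGoA (full : List String) : List (Int × String) → List String
  | [] => []
  | (i, j) :: rest =>
      if j = "l" then PySem.List.slice full (some 0) (some i)
      else if j = "r" then PySem.List.slice full (some (i + 1)) none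
      else solutionGoA full rest

def solution (str_list : List String) : List String :=
  if 1 ≤ str_list.length ∧ str_list.length ≤ 20 then
    solutionGoA str_list (PySem.List.enumerate str_list 0)
  else []  -- Python returns -1 here (not a List String); excluded by Pre_solution

-- ===== PORT B =====
-- _scan: index-free recursion; tag says which marker ended it, "before l" prefix is consed back
def scanB : List String → Option String × List String
  | [] => (none, [])
  | head :: tail =>
      if head = "l" then (some "l", [])
      else if head = "r" then (some "r", tail)
      else
        let (tag, rest) := scanB tail
        if tag = some "l" then (tag, head :: rest) else (tag, rest)

def solution_alt (str_list : List String) : List String :=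
  if 1 ≤ str_list.length ∧ str_list.length ≤ 20 then (scanB str_list).2
  else []  -- Python returns -1 here; excluded by Pre_solution

-- ===== PRECONDITION & SPEC =====
-- Pre_ excludes lists whose length is outside 1..20: there A returns -1, which is not a List String.
def Pre_solution (str_list : List String) : Prop :=
  1 ≤ str_list.length ∧ str_list.length ≤ 20
instance (str_list : List String) : Decidable (Pre_solution str_list) := by unfold Pre_solution; infer_instance
def pvWitness_solution : List String := ["a", "r", "b"]

def Spec_solution (str_list : List String) (out : List String) : Prop := out = solution_alt str_list
instance (str_list : List String) (out : List String) : Decidable (Spec_solution str_list out) := by unfold Spec_solution; infer_instance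

-- ===== CLAIM (what is proved, stated in full; the proofs are below) =====
def Claim_equal_solution : Prop := ∀ (str_list : List String), Dom_solution str_list → Pre_solution str_list → Spec_solution str_list (solution str_list)

-- ===== LEMMAS AND PROOFS =====

lemma idxOf_cons_ne (x v : String) (t : List String) (h : x ≠ v) :
    List.idxOf v (x :: t) = List.idxOf v t + 1 := by
  simp [h]

lemma mem_cons_ne (x v : String) (t : List String) (h : x ≠ v) :
    (v ∈ x :: t) = (v ∈ t) := by
  apply propext
  rw [List.mem_cons]
  constructor
  · rintro (e | m)
    · exact absurd e.symm h
    · exact m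
  · exact Or.inr

-- the common characterisation by the first positions of "l" and "r"
def charLR (xs : List String) : List String :=
  if "l" ∈ xs ∧ List.idxOf "l" xs < List.idxOf "r" xs then xs.take (List.idxOf "l" xs)
  else if "r" ∈ xs then xs.drop (List.idxOf "r" xs + 1)
  else []

-- A's scan, characterised by the first positions of "l" and "r"
lemma goA_spec (full : List String) (xs : List String) : ∀ (s : Nat),
    solutionGoA full (PySem.List.enumerate xs (s : Int)) =
      (if "l" ∈ xs ∧ List.idxOf "l" xs < List.idxOf "r" xs then full.take (s + List.idxOf "l" xs)
       else if "r" ∈ xs then full.drop (s + List.idxOf "r" xs + 1)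
       else []) := by
  induction xs with
  | nil => intro s; simp [PySem.List.enumerate_nil, solutionGoA]
  | cons x t ih =>
    intro s
    rw [PySem.List.enumerate_cons]
    by_cases hl : x = "l"
    · subst hl
      have hr : ("l" : String) ≠ "r" := by decide
      simp [solutionGoA,
        PySem.List.slice_toNat full (a := 0) (b := (s : Int)) (by omega) (by positivity)]
    · by_cases hr : x = "r"
      · subst hr
        have hne : ("l" : String) ≠ "r" := by decide
        have h1 : PySem.List.slice full (some ((s : Int) + 1)) none = full.drop (s + 1) := by
          rw [PySem.List.slice_from full (a := (s : Int) + 1) (by positivity)]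
          norm_num
        by_cases hlm : "l" ∈ t
        · simp [solutionGoA, hlm, h1, idxOf_cons_ne _ _ _ hne.symm]
        · simp [solutionGoA, hlm, h1]
      · have h2 : ((s : Int) + 1) = (((s + 1 : Nat)) : Int) := by push_cast; ring
        simp only [solutionGoA, hl, hr, if_false, h2, ih (s + 1)]
        simp only [mem_cons_ne x "l" t hl, mem_cons_ne x "r" t hr,
            idxOf_cons_ne x "l" t hl, idxOf_cons_ne x "r" t hr]
        by_cases c1 : "l" ∈ t ∧ List.idxOf "l" t < List.idxOf "r" t
        · have c2 : "l" ∈ t ∧ List.idxOf "l" t + 1 < List.idxOf "r" t + 1 := ⟨c1.1, by omega⟩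
          rw [if_pos c1, if_pos c2]
          congr 1; omega
        · have c2 : ¬ ("l" ∈ t ∧ List.idxOf "l" t + 1 < List.idxOf "r" t + 1) := by
            intro ⟨a, b⟩; exact c1 ⟨a, by omega⟩
          rw [if_neg c1, if_neg c2]
          by_cases c3 : "r" ∈ t
          · rw [if_pos c3, if_pos c3]; congr 1; omega
          · rw [if_neg c3, if_neg c3]

-- B's recursion, characterised by the same positions (with its tag)
lemma scanB_spec (xs : List String) :
    scanB xs =
      (if "l" ∈ xs ∧ List.idxOf "l" xs < List.idxOf "r" xs then
         (some "l", xs.take (List.idxOf "l" xs))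
       else if "r" ∈ xs then (some "r", xs.drop (List.idxOf "r" xs + 1))
       else (none, [])) := by
  induction xs with
  | nil => simp [scanB]
  | cons x t ih =>
    by_cases hl : x = "l"
    · subst hl
      have hne : ("l" : String) ≠ "r" := by decide
      have hridx : 0 < List.idxOf "r" ("l" :: t) := by
        rw [idxOf_cons_ne _ _ _ hne]; omega
      simp [scanB, hridx]
    · by_cases hr : x = "r"
      · subst hr
        have hne : ("l" : String) ≠ "r" := by decide
        have hc : ¬ ("l" ∈ ("r" :: t) ∧ List.idxOf "l" ("r" :: t) < List.idxOf "r" ("r" :: t)) := by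
          intro ⟨_, b⟩
          rw [List.idxOf_cons_self] at b
          omega
        rw [scanB, if_neg (by decide), if_pos rfl, if_neg hc,
          if_pos (List.mem_cons_self), List.idxOf_cons_self]
        simp
      · rw [scanB, if_neg hl, if_neg hr]
        simp only [ih]
        simp only [mem_cons_ne x "l" t hl, mem_cons_ne x "r" t hr,
            idxOf_cons_ne x "l" t hl, idxOf_cons_ne x "r" t hr]
        by_cases c1 : "l" ∈ t ∧ List.idxOf "l" t < List.idxOf "r" t
        · have c2 : "l" ∈ t ∧ List.idxOf "l" t + 1 < List.idxOf "r" t + 1 := ⟨c1.1, by omega⟩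
          rw [if_pos c1, if_pos c2]
          simp [List.take_succ_cons]
        · have c2 : ¬ ("l" ∈ t ∧ List.idxOf "l" t + 1 < List.idxOf "r" t + 1) := by
            intro ⟨a, b⟩; exact c1 ⟨a, by omega⟩
          rw [if_neg c1, if_neg c2]
          by_cases c3 : "r" ∈ t
          · rw [if_pos c3, if_pos c3]; simp
          · rw [if_neg c3, if_neg c3]; simp

-- ===== VERDICT (by name: the statement is the Claim_ definition above) =====
theorem solution_spec : Claim_equal_solution := by
  intro xs _ hpre
  unfold Spec_solution solution solution_alt
  simp only [if_pos (show 1 ≤ xs.length ∧ xs.length ≤ 20 from hpre)]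
  have hg := goA_spec xs xs 0
  simp only [Nat.cast_zero, zero_add] at hg
  rw [hg, scanB_spec]
  by_cases c1 : "l" ∈ xs ∧ List.idxOf "l" xs < List.idxOf "r" xs
  · rw [if_pos c1, if_pos c1]
  · rw [if_neg c1, if_neg c1]
    by_cases c3 : "r" ∈ xs
    · rw [if_pos c3, if_pos c3]
    · rw [if_neg c3, if_neg c3]
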